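-- pv_equiv track=rewrite | github.com/YadaYuki/atcoder- | abc234/e3.py | get_arithmetics
-- ===== SOURCE A (Python) =====
-- def get_arithmetics(head,diff,max_digit):
--     if head + diff > 9 or head + diff < 0:
--         return []
--     else:
--         arithmetic_arr = [head]
--         tail = head + diff
--         arithmetics = []
--         while len(arithmetic_arr) < max_digit and (0 <= tail and tail <= 9):
--             arithmetic_arr.append(tail)
--             arithmetics.append(arithmetic_arr[:])
--             tail += diff
--         return arithmetics
-- ===== SOURCE B (Python) =====
-- def get_arithmetics(head, diff, max_digit):
--     # Closed form: compute the number n of valid tail steps arithmetically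
--     # (no simulation loop), then generate each sequence directly by formula.
--     t = head + diff
--     if t < 0 or t > 9 or max_digit <= 1:
--         n = 0
--     elif diff > 0:
--         n = min(max_digit - 1, (9 - head) // diff)
--     elif diff < 0:
--         n = min(max_digit - 1, (0 - head) // diff)
--     else:
--         n = max_digit - 1
--     return [[head + j * diff for j in range(m)] for m in range(2, n + 2)]
-- ===== Notes on version B (the rewrite author's own statement) =====
-- stated objective: alternative
-- what changed: B replaces A's while-loop simulation (growing the array and snapshotting it each iteration) by a closed-form count of valid steps computed with floor division per sign of diff, then generates each sequence directly by the formula head + j*diff.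
import Mathlib
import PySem

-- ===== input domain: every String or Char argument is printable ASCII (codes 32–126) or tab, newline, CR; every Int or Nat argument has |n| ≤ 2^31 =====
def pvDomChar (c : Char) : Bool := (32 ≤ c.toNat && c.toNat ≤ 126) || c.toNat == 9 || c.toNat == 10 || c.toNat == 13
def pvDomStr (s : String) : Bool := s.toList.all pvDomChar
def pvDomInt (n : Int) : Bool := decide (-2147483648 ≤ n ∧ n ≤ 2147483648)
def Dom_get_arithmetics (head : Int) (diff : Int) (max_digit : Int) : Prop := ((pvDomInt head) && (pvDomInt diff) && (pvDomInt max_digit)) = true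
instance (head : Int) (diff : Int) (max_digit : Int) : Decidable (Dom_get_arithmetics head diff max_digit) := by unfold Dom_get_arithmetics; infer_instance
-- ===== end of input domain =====

-- B replaces A's simulation loop by a closed-form count of valid steps (floor
-- division per sign of diff) and generates each sequence directly by formula.

-- ===== PORT A =====
-- the while loop of A: state = (arithmetic_arr, tail, arithmetics)
def getArithLoopA (diff max_digit : Int) (arr : List Int) (tail : Int) (acc : List (List Int)) : List (List Int) :=
  if (arr.length : Int) < max_digit ∧ 0 ≤ tail ∧ tail ≤ 9 then
    getArithLoopA diff max_digit (arr ++ [tail]) (tail + diff) (acc ++ [arr ++ [tail]])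
  else acc
termination_by (max_digit - arr.length).toNat
decreasing_by simp only [List.length_append, List.length_cons, List.length_nil]; omega

def get_arithmetics (head : Int) (diff : Int) (max_digit : Int) : List (List Int) :=
  if head + diff > 9 ∨ head + diff < 0 then []
  else getArithLoopA diff max_digit [head] (head + diff) []

-- ===== PORT B =====
-- B's closed-form step count n
def altCount (head diff max_digit : Int) : Int :=
  if head + diff < 0 ∨ head + diff > 9 ∨ max_digit ≤ 1 then 0
  else if diff > 0 then min (max_digit - 1) (PySem.Int.floordiv (9 - head) diff)
  else if diff < 0 then min (max_digit - 1) (PySem.Int.floordiv (0 - head) diff)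
  else max_digit - 1

def get_arithmetics_alt (head : Int) (diff : Int) (max_digit : Int) : List (List Int) :=
  let n := altCount head diff max_digit
  (PySem.List.pyRange 2 (n + 2) 1).map
    (fun m => (PySem.List.pyRange 0 m 1).map (fun j => head + j * diff))

-- ===== PRECONDITION & SPEC =====
def Spec_get_arithmetics (head : Int) (diff : Int) (max_digit : Int) (out : List (List Int)) : Prop := out = get_arithmetics_alt head diff max_digit
instance (head : Int) (diff : Int) (max_digit : Int) (out : List (List Int)) : Decidable (Spec_get_arithmetics head diff max_digit out) := by unfold Spec_get_arithmetics; infer_instance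

-- ===== CLAIM (what is proved, stated in full; the proofs are below) =====
def Claim_equal_get_arithmetics : Prop := ∀ (head : Int) (diff : Int) (max_digit : Int), Dom_get_arithmetics head diff max_digit → Spec_get_arithmetics head diff max_digit (get_arithmetics head diff max_digit)

-- ===== LEMMAS AND PROOFS =====

/-- the arithmetic sequence head, head+diff, …, of length m -/
def pvSeq (head diff : Int) (m : Nat) : List Int :=
  (List.range m).map (fun j : Nat => head + (j : Int) * diff)

/-- proof-only helper: the maximal array A's loop builds -/
def getFullLoop (diff max_digit : Int) (full : List Int) (tail : Int) : List Int :=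
  if (full.length : Int) < max_digit ∧ 0 ≤ tail ∧ tail ≤ 9 then
    getFullLoop diff max_digit (full ++ [tail]) (tail + diff)
  else full
termination_by (max_digit - full.length).toNat
decreasing_by simp only [List.length_append, List.length_cons, List.length_nil]; omega

theorem getFullLoop_prefix (diff max_digit : Int) (full : List Int) (tail : Int) :
    ∃ ext, getFullLoop diff max_digit full tail = full ++ ext := by
  fun_induction getFullLoop diff max_digit full tail with
  | case1 full tail h ih =>
      obtain ⟨ext, he⟩ := ih
      exact ⟨tail :: ext, by rw [he, List.append_assoc]; rfl⟩
  | case2 full tail h => exact ⟨[], by simp⟩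

/-- A's loop result, characterised as prefixes of the maximal sequence -/
theorem loopA_eq (diff max_digit : Int) (arr : List Int) (tail : Int) (acc : List (List Int)) :
    getArithLoopA diff max_digit arr tail acc =
      acc ++ (List.range' (arr.length + 1)
        ((getFullLoop diff max_digit arr tail).length - arr.length)).map
          (fun i => (getFullLoop diff max_digit arr tail).take i) := by
  fun_induction getArithLoopA diff max_digit arr tail acc with
  | case1 arr tail acc h ih =>
      have hfull : getFullLoop diff max_digit arr tail =
          getFullLoop diff max_digit (arr ++ [tail]) (tail + diff) := by
        conv_lhs => rw [getFullLoop]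
        rw [if_pos h]
      rw [ih, hfull]
      obtain ⟨ext, he⟩ := getFullLoop_prefix diff max_digit (arr ++ [tail]) (tail + diff)
      rw [he]
      have hlen : ((arr ++ [tail]) ++ ext).length = arr.length + 1 + ext.length := by simp; omega
      rw [hlen]
      have h1 : arr.length + 1 + ext.length - arr.length = ext.length + 1 := by omega
      have h2 : arr.length + 1 + ext.length - (arr ++ [tail]).length = ext.length := by
        simp
      rw [h1, h2, List.range'_succ, List.map_cons]
      have htake : ((arr ++ [tail]) ++ ext).take (arr.length + 1) = arr ++ [tail] := by
        have : arr.length + 1 = (arr ++ [tail]).length := by simp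
        rw [this, List.take_left]
      rw [htake]
      simp [List.append_assoc]
  | case2 arr tail acc h =>
      rw [getFullLoop, if_neg h]
      simp

/-- characterisation of the maximal sequence: pvSeq head diff L for the least L ≥ m
    at which the loop condition fails -/
theorem fullLoop_char (diff max_digit head : Int) (arr : List Int) (tail : Int) :
    ∀ m : Nat, 1 ≤ m → arr = pvSeq head diff m → tail = head + (m : Int) * diff →
    ∃ L : Nat, m ≤ L ∧ getFullLoop diff max_digit arr tail = pvSeq head diff L ∧
      (∀ i : Nat, m ≤ i → i < L → ((i : Int) < max_digit ∧ 0 ≤ head + (i : Int) * diff ∧ head + (i : Int) * diff ≤ 9)) ∧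
      ¬ ((L : Int) < max_digit ∧ 0 ≤ head + (L : Int) * diff ∧ head + (L : Int) * diff ≤ 9) := by
  fun_induction getFullLoop diff max_digit arr tail with
  | case1 arr tail h ih =>
      intro m hm harr htail
      have hlen : arr.length = m := by rw [harr]; simp [pvSeq]
      have harr' : arr ++ [tail] = pvSeq head diff (m + 1) := by
        rw [harr, htail]; simp [pvSeq, List.range_succ]
      have htail' : tail + diff = head + ((m + 1 : Nat) : Int) * diff := by
        rw [htail]; push_cast; ring
      obtain ⟨L, hmL, hres, hgood, hstop⟩ := ih (m + 1) (by omega) harr' htail'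
      refine ⟨L, by omega, hres, ?_, hstop⟩
      intro i hmi hiL
      rcases Nat.eq_or_lt_of_le hmi with heq | hlt
      · subst heq
        rw [hlen] at h
        exact ⟨h.1, by rw [htail] at h; exact h.2⟩
      · exact hgood i hlt hiL
  | case2 arr tail h =>
      intro m hm harr htail
      have hlen : arr.length = m := by rw [harr]; simp [pvSeq]
      refine ⟨m, le_refl m, harr.symm ▸ rfl, by omega, ?_⟩
      rw [hlen, htail] at h
      exact h

/-- least counterexamples are unique -/
theorem least_unique (P : Nat → Prop) (L₁ L₂ : Nat) (h₁ : 1 ≤ L₁) (h₂ : 1 ≤ L₂)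
    (g₁ : ∀ i, 1 ≤ i → i < L₁ → P i) (s₁ : ¬ P L₁)
    (g₂ : ∀ i, 1 ≤ i → i < L₂ → P i) (s₂ : ¬ P L₂) : L₁ = L₂ := by
  rcases lt_trichotomy L₁ L₂ with hlt | heq | hgt
  · exact absurd (g₂ L₁ h₁ hlt) s₁
  · exact heq
  · exact absurd (g₁ L₂ h₂ hgt) s₂

/-- prefixes of a pvSeq are pvSeqs -/
theorem pvSeq_take (head diff : Int) (L i : Nat) (h : i ≤ L) :
    (pvSeq head diff L).take i = pvSeq head diff i := by
  unfold pvSeq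
  rw [← List.map_take, List.take_range, Nat.min_eq_left h]

/-- B rendered over List.range': the comprehension is the map of pvSeq over lengths 2..n+1 -/
theorem alt_eq_range' (head diff max_digit : Int) (hn : 0 ≤ altCount head diff max_digit) :
    get_arithmetics_alt head diff max_digit =
      (List.range' 2 (altCount head diff max_digit).toNat).map (fun m => pvSeq head diff m) := by
  unfold get_arithmetics_alt
  dsimp only
  rw [PySem.List.pyRange_one]
  have hcount : ((altCount head diff max_digit + 2) - 2).toNat = (altCount head diff max_digit).toNat := by omega
  rw [hcount, List.range'_eq_map_range, List.map_map, List.map_map]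
  apply List.map_congr_left
  intro k hk
  simp only [Function.comp]
  rw [show ((2:Int) + (k : Int)) = (((2 + k : Nat)) : Int) by push_cast; ring,
    PySem.List.pyRange_zero_natCast, List.map_map, pvSeq]
  rfl

/-- altCount is the number of loop steps: it is nonnegative, good on 1..n, and the
    loop condition fails at n+1 (in the non-guard case) -/
theorem altCount_char (head diff max_digit : Int) (hg : 0 ≤ head + diff ∧ head + diff ≤ 9) :
    0 ≤ altCount head diff max_digit ∧
    (∀ i : Nat, 1 ≤ i → (i : Int) ≤ altCount head diff max_digit →
      ((i : Int) < max_digit ∧ 0 ≤ head + (i : Int) * diff ∧ head + (i : Int) * diff ≤ 9)) ∧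
    ¬ ((altCount head diff max_digit + 1) < max_digit ∧
        0 ≤ head + (altCount head diff max_digit + 1) * diff ∧
        head + (altCount head diff max_digit + 1) * diff ≤ 9) := by
  unfold altCount
  by_cases hdeg : head + diff < 0 ∨ head + diff > 9 ∨ max_digit ≤ 1
  · rw [if_pos hdeg]
    have hmd : max_digit ≤ 1 := by omega
    refine ⟨le_refl 0, by intro i hi hin; omega, ?_⟩
    rintro ⟨h1, -⟩
    omega
  · rw [if_neg hdeg]
    push Not at hdeg
    obtain ⟨-, -, hmd⟩ := hdeg
    rcases lt_trichotomy diff 0 with hd | hd | hd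
    · rw [if_neg (by omega), if_pos hd]
      -- q = floordiv (0 - head) diff = floordiv head (-diff), with -diff > 0
      have hq : PySem.Int.floordiv (0 - head) diff = PySem.Int.floordiv head (-diff) := by
        have hnn := PySem.Int.floordiv_neg_neg head (-diff)
        rw [neg_neg] at hnn
        rw [show (0 - head) = -head by ring, hnn]
      rw [hq]
      have hqpos : (1 : Int) ≤ PySem.Int.floordiv head (-diff) :=
        (PySem.Int.le_floordiv_iff_mul_le (by omega)).mpr (by nlinarith [hg.1])
      refine ⟨by omega, ?_, ?_⟩
      · intro i hi hin
        have hiq : (i : Int) ≤ PySem.Int.floordiv head (-diff) := by omega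
        have hmul : (i : Int) * (-diff) ≤ head := (PySem.Int.le_floordiv_iff_mul_le (by omega)).mp hiq
        refine ⟨by omega, by nlinarith, ?_⟩
        have hstep : ((i : Int) - 1) * diff ≤ 0 := by nlinarith
        nlinarith [hg.2]
      · set q := PySem.Int.floordiv head (-diff) with hqdef
        by_cases hm : max_digit - 1 ≤ q
        · rw [min_eq_left hm]
          rintro ⟨h1, -⟩
          omega
        · push Not at hm
          rw [min_eq_right hm.le]
          have hlt : head < (q + 1) * (-diff) :=
            (PySem.Int.floordiv_lt_iff_lt_mul (by omega)).mp (by omega)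
          rintro ⟨-, h0, -⟩
          nlinarith
    · rw [if_neg (by omega), if_neg (by omega)]
      refine ⟨by omega, ?_, ?_⟩
      · intro i hi hin
        subst hd
        refine ⟨by omega, by simpa using hg.1, by simpa using hg.2⟩
      · rintro ⟨h1, -⟩
        omega
    · rw [if_pos hd]
      have hqpos : (1 : Int) ≤ PySem.Int.floordiv (9 - head) diff :=
        (PySem.Int.le_floordiv_iff_mul_le hd).mpr (by nlinarith [hg.2])
      refine ⟨by omega, ?_, ?_⟩
      · intro i hi hin
        have hiq : (i : Int) ≤ PySem.Int.floordiv (9 - head) diff := by omega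
        have hmul : (i : Int) * diff ≤ 9 - head := (PySem.Int.le_floordiv_iff_mul_le hd).mp hiq
        refine ⟨by omega, ?_, by omega⟩
        have hstep : 0 ≤ ((i : Int) - 1) * diff :=
          mul_nonneg (by omega) hd.le
        nlinarith [hg.1]
      · set q := PySem.Int.floordiv (9 - head) diff with hqdef
        by_cases hm : max_digit - 1 ≤ q
        · rw [min_eq_left hm]
          rintro ⟨h1, -⟩
          omega
        · push Not at hm
          rw [min_eq_right hm.le]
          have hlt : 9 - head < (q + 1) * diff :=
            (PySem.Int.floordiv_lt_iff_lt_mul hd).mp (by omega)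
          rintro ⟨-, -, h9⟩
          nlinarith

-- ===== VERDICT (by name: the statement is the Claim_ definition above) =====
theorem get_arithmetics_spec : Claim_equal_get_arithmetics := by
  intro head diff max_digit _
  unfold Spec_get_arithmetics get_arithmetics
  by_cases hg : head + diff > 9 ∨ head + diff < 0
  · rw [if_pos hg]
    have hz : altCount head diff max_digit = 0 := by
      unfold altCount
      rw [if_pos (by omega)]
    rw [alt_eq_range' head diff max_digit (by omega), hz]
    simp
  · rw [if_neg hg]
    push Not at hg
    obtain ⟨hn0, hgood1, hstopn⟩ := altCount_char head diff max_digit ⟨by omega, by omega⟩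
    obtain ⟨L, hL1, hfull, hgood, hstop⟩ :=
      fullLoop_char diff max_digit head [head] (head + diff) 1 le_rfl
        (by simp [pvSeq]) (by push_cast; ring)
    rw [loopA_eq, hfull]
    have hlenF : (pvSeq head diff L).length = L := by simp [pvSeq]
    simp only [hlenF, List.length_cons, List.length_nil, List.nil_append]
    set n := altCount head diff max_digit with hndef
    have hLn : L = n.toNat + 1 := by
      refine least_unique
        (fun i => ((i : Int) < max_digit ∧ 0 ≤ head + (i : Int) * diff ∧ head + (i : Int) * diff ≤ 9))
        L (n.toNat + 1) hL1 (by omega) hgood hstop ?_ ?_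
      · intro i hi hil
        exact hgood1 i hi (by omega)
      · have hcast : ((n.toNat + 1 : Nat) : Int) = n + 1 := by omega
        simpa only [hcast] using hstopn
    rw [alt_eq_range' head diff max_digit hn0, hLn]
    simp only [Nat.add_sub_cancel]
    apply List.map_congr_left
    intro i hi
    rw [List.mem_range'] at hi
    exact pvSeq_take head diff (n.toNat + 1) i (by omega)
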